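-- pv_equiv track=rewrite | github.com/franskloet/ceph-s3-dir-builder | export-config.py | compute_level_from_actions
-- ===== SOURCE A (Python) =====
-- from typing import Dict, List, Optional, Tuple
--
-- def compute_level_from_actions(actions: List[str]) -> str:
--     # Normalize
--     acts = set(a.lower() for a in actions)
--     if any(a in acts for a in ["s3:*", "s3:*"]):
--         return 'full'
--     has_put = 's3:putobject' in acts
--     has_del = 's3:deleteobject' in acts
--     # ListBucket indicates read scope
--     has_get = 's3:getobject' in acts
--     if has_put or has_del:
--         return 'write'
--     if has_get:
--         return 'read'
--     # Fallback: treat as read if ListBucket only, else full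
--     return 'read'
-- ===== SOURCE B (Python) =====
-- def compute_level_from_actions(actions):
--     # accumulator scan: track a numeric rank instead of building a set
--     level = 1
--     for a in actions:
--         la = a.lower()
--         if la == 's3:*':
--             level = 3
--             break
--         if la in ('s3:putobject', 's3:deleteobject') and level < 2:
--             level = 2
--     return 'full' if level == 3 else ('write' if level == 2 else 'read')
-- ===== Notes on version B (the rewrite author's own statement) =====
-- stated objective: alternative
-- what changed: Replaced the set-of-lowercased-actions plus three membership lookups with a single accumulator scan that tracks a numeric rank (1=read,2=write,3=full) and short-circuits on 's3:*'.
import Mathlib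
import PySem

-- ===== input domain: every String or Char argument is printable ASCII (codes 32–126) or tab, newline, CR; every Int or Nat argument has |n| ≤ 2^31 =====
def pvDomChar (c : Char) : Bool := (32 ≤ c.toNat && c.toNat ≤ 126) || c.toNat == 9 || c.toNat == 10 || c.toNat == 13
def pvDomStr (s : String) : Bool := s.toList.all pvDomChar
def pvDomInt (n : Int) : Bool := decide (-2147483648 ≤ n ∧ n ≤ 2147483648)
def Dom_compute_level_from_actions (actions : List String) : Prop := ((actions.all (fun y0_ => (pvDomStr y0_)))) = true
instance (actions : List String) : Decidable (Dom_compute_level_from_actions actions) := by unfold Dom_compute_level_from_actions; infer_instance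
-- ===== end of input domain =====

-- B replaces A's set-of-lowercased-actions plus membership lookups by a single
-- rank-accumulator scan with early exit on 's3:*' (alternative decomposition, same cost).


-- ===== PORT A =====
def compute_level_from_actions (actions : List String) : String :=
  let acts : PySem.Set String := PySem.Set.ofList (actions.map PySem.Str.lower)
  if (["s3:*", "s3:*"] : List String).any (fun a => PySem.Set.contains acts a) then "full"
  else
    let has_put := PySem.Set.contains acts "s3:putobject"
    let has_del := PySem.Set.contains acts "s3:deleteobject"
    let has_get := PySem.Set.contains acts "s3:getobject"
    if has_put || has_del then "write"
    else if has_get then "read"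
    else "read"

-- ===== PORT B =====
-- the 'for' loop of Source B with its 'break' as structural recursion on the list
def pvAltLoop (l : List String) (level : Int) : Int :=
  match l with
  | [] => level
  | a :: rest =>
    let la := PySem.Str.lower a
    if la = "s3:*" then 3
    else if (la = "s3:putobject" ∨ la = "s3:deleteobject") ∧ level < 2 then pvAltLoop rest 2
    else pvAltLoop rest level

def compute_level_from_actions_alt (actions : List String) : String :=
  let level := pvAltLoop actions 1
  if level = 3 then "full" else if level = 2 then "write" else "read"

-- ===== PRECONDITION & SPEC =====
def Spec_compute_level_from_actions (actions : List String) (out : String) : Prop := out = compute_level_from_actions_alt actions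
instance (actions : List String) (out : String) : Decidable (Spec_compute_level_from_actions actions out) := by unfold Spec_compute_level_from_actions; infer_instance

-- ===== CLAIM (what is proved, stated in full; the proofs are below) =====
def Claim_equal_compute_level_from_actions : Prop := ∀ (actions : List String), Dom_compute_level_from_actions actions → Spec_compute_level_from_actions actions (compute_level_from_actions actions)

-- ===== LEMMAS AND PROOFS =====

lemma pvAltLoop_char (l : List String) (level : Int) (h : level = 1 ∨ level = 2) :
    pvAltLoop l level =
      if "s3:*" ∈ l.map PySem.Str.lower then 3
      else if level = 2 ∨ "s3:putobject" ∈ l.map PySem.Str.lower ∨ "s3:deleteobject" ∈ l.map PySem.Str.lower then 2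
      else 1 := by
  induction l generalizing level with
  | nil =>
    simp [pvAltLoop]
    rcases h with h | h <;> simp [h]
  | cons a rest ih =>
    simp only [pvAltLoop, List.map_cons, List.mem_cons]
    have h1s : ∀ (x : String), PySem.Str.lower a ≠ x → x ≠ PySem.Str.lower a := fun _ hx he => hx he.symm
    by_cases h1 : PySem.Str.lower a = "s3:*"
    · simp [h1]
    · by_cases h2 : (PySem.Str.lower a = "s3:putobject" ∨ PySem.Str.lower a = "s3:deleteobject") ∧ level < 2
      · rw [if_neg h1, if_pos h2, ih 2 (Or.inr rfl)]
        rcases h2 with ⟨h2, _⟩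
        rcases h2 with h2 | h2 <;> simp [h2]
      · rw [if_neg h1, if_neg h2, ih level h]
        rcases h with hl | hl
        · subst hl
          by_cases hp : PySem.Str.lower a = "s3:putobject"
          · exact absurd (h2 ⟨Or.inl hp, by norm_num⟩) (by simp)
          · by_cases hd : PySem.Str.lower a = "s3:deleteobject"
            · exact absurd (h2 ⟨Or.inr hd, by norm_num⟩) (by simp)
            · simp [h1s _ h1, h1s _ hp, h1s _ hd]
        · subst hl; simp [h1s _ h1]

-- ===== VERDICT (by name: the statement is the Claim_ definition above) =====
theorem compute_level_from_actions_spec : Claim_equal_compute_level_from_actions := by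
  intro actions _
  unfold Spec_compute_level_from_actions compute_level_from_actions compute_level_from_actions_alt
  rw [pvAltLoop_char actions 1 (Or.inl rfl)]
  by_cases hf : ∃ a ∈ actions, PySem.Str.lower a = "s3:*"
  · simp [List.mem_map, hf]
  · by_cases hp : ∃ a ∈ actions, PySem.Str.lower a = "s3:putobject"
    · simp [List.mem_map, hf, hp]
    · by_cases hd : ∃ a ∈ actions, PySem.Str.lower a = "s3:deleteobject"
      · simp [List.mem_map, hf, hp, hd]
      · by_cases hg : ∃ a ∈ actions, PySem.Str.lower a = "s3:getobject" <;>
          simp [List.mem_map, hf, hp, hd, hg]
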